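-- pv_equiv track=rewrite | github.com/ninhcuong/BTL_PYTHON_boom | pyhon/Th2_Phan_Tu_chot.py | count_pivots
-- ===== SOURCE A (Python) =====
-- def count_pivots(arr, n):
--     count = 0
--     max_left = -1
--     for i in range(n):
--         if arr[i] >= max_left:
--             max_right = max(arr[i+1:]) if i < n-1 else -1
--             if arr[i] > max_right:
--                 count += 1
--             max_left = arr[i]
--     return count
-- ===== SOURCE B (Python) =====
-- def count_pivots(arr, n):
--     # One pass with a precomputed suffix-max array instead of re-scanning
--     # arr[i+1:] at every qualifying index.
--     count = 0
--     suf = [0] * (len(arr) + 1)  # suf[i] = max(arr[i:]) for i < len(arr)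
--     best = None
--     for i in range(len(arr) - 1, -1, -1):
--         best = arr[i] if best is None or arr[i] > best else best
--         suf[i] = best
--     run = -1
--     for i in range(n):
--         x = arr[i]
--         if x >= run and x > (suf[i + 1] if i < n - 1 else -1):
--             count += 1
--         run = x if x > run else run
--     return count
-- ===== Notes on version B (the rewrite author's own statement) =====
-- stated objective: alternative
-- what changed: Replaced the per-index rescan max(arr[i+1:]) by a precomputed suffix-max array plus a running prefix max in one forward pass (O(len+n) instead of worst-case O(n*len); a timing run's descending inputs are A's best case, so no speed is claimed).
import Mathlib
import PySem

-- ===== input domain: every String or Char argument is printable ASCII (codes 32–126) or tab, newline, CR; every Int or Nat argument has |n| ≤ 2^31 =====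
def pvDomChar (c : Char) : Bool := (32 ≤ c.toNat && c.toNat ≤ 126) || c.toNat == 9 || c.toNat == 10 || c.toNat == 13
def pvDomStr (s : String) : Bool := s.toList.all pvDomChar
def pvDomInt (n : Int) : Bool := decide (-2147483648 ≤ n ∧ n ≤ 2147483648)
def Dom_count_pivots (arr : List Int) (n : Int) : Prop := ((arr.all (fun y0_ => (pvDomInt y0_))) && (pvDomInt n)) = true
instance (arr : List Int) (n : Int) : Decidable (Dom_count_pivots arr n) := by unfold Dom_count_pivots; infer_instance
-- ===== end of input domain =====

-- B replaces A's per-index rescan max(arr[i+1:]) by a precomputed suffix-max list and a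
-- running prefix max in one forward pass (objective: alternative algorithm).

-- ===== PORT A =====
-- literal port of A: loop body of 'for i in range(n)' with state (count, max_left);
-- arr[i] via pyGetD, max(arr[i+1:]) via max? of the slice
def stepA (arr : List Int) (n : Int) (st : Int × Int) (i : Int) : Int × Int :=
  let count := st.1
  let max_left := st.2
  let x := PySem.List.pyGetD arr i 0
  if x ≥ max_left then
    let max_right := if i < n - 1 then
        (PySem.List.max? (PySem.List.slice arr (some (i + 1)) none) (fun y => y)).getD 0
      else -1
    ((if x > max_right then count + 1 else count), x)
  else (count, max_left)

def count_pivots (arr : List Int) (n : Int) : Int :=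
  ((PySem.List.pyRange 0 n 1).foldl (stepA arr n) (0, -1)).1

-- ===== PORT B =====
-- B's backward index loop writing suf[i] = max(arr[i:]) becomes the obvious structural
-- recursion producing the same suffix-max list
def sufMaxes : List Int → List Int
  | [] => []
  | x :: xs =>
    match sufMaxes xs with
    | [] => [x]
    | y :: ys => (if x > y then x else y) :: y :: ys

-- loop body of B's forward pass, state (count, run)
def stepB (arr suf : List Int) (n : Int) (st : Int × Int) (i : Int) : Int × Int :=
  let count := st.1
  let run := st.2
  let x := PySem.List.pyGetD arr i 0
  let right := if i < n - 1 then PySem.List.pyGetD suf (i + 1) (-1) else -1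
  ((if x ≥ run ∧ x > right then count + 1 else count),
   (if x > run then x else run))

def count_pivots_alt (arr : List Int) (n : Int) : Int :=
  let suf := sufMaxes arr
  ((PySem.List.pyRange 0 n 1).foldl (stepB arr suf n) (0, -1)).1

-- ===== PRECONDITION & SPEC =====
-- A raises IndexError (arr[i]) as soon as n exceeds len(arr); it returns normally iff n ≤ len(arr).
def Pre_count_pivots (arr : List Int) (n : Int) : Prop := n ≤ (arr.length : Int)
instance (arr : List Int) (n : Int) : Decidable (Pre_count_pivots arr n) := by unfold Pre_count_pivots; infer_instance

def pvWitness_count_pivots : List Int × Int := ([3, 1, 2], 3)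

def Spec_count_pivots (arr : List Int) (n : Int) (out : Int) : Prop := out = count_pivots_alt arr n
instance (arr : List Int) (n : Int) (out : Int) : Decidable (Spec_count_pivots arr n out) := by unfold Spec_count_pivots; infer_instance

-- ===== CLAIM (what is proved, stated in full; the proofs are below) =====
def Claim_equal_count_pivots : Prop := ∀ (arr : List Int) (n : Int), Dom_count_pivots arr n → Pre_count_pivots arr n → Spec_count_pivots arr n (count_pivots arr n)

-- ===== LEMMAS AND PROOFS =====

lemma sufMaxes_length (arr : List Int) : (sufMaxes arr).length = arr.length := by
  induction arr with
  | nil => rfl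
  | cons x xs ih =>
    simp only [sufMaxes]
    cases h : sufMaxes xs with
    | nil => simp [h] at ih; simp [ih]
    | cons y ys => rw [h] at ih; simpa using ih

lemma foldl_max_cons (l : List Int) : ∀ a b : Int, List.foldl max (max a b) l = max a (List.foldl max b l) := by
  induction l with
  | nil => intro a b; rfl
  | cons c cs ih =>
    intro a b
    simp only [List.foldl]
    rw [max_assoc, ih]

lemma sufMaxes_getD (arr : List Int) : ∀ (j : Nat) (d : Int), j < arr.length →
    some ((sufMaxes arr).getD j d) = PySem.List.max? (arr.drop j) (fun y => y) := by
  induction arr with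
  | nil => intro j d h; simp at h
  | cons x xs ih =>
    intro j d h
    cases j with
    | zero =>
      simp only [List.drop_zero]
      cases hxs : xs with
      | nil => subst hxs; simp [sufMaxes, PySem.List.max?_id_cons]
      | cons z zs =>
        subst hxs
        have hne : sufMaxes (z :: zs) ≠ [] := by
          intro hnil
          have hl := sufMaxes_length (z :: zs)
          rw [hnil] at hl
          simp at hl
        obtain ⟨y, ys, hy⟩ := List.exists_cons_of_ne_nil hne
        have ihy := ih 0 d (by simp)
        rw [hy] at ihy
        simp only [List.drop_zero, List.getD, List.getElem?_cons_zero, Option.getD_some] at ihy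
        have hout : sufMaxes (x :: z :: zs) = (if x > y then x else y) :: y :: ys := by
          rw [sufMaxes, hy]
        rw [hout]
        rw [PySem.List.max?_id_cons] at ihy ⊢
        simp only [Option.some.injEq] at ihy ⊢
        simp only [List.getD, List.getElem?_cons_zero, Option.getD_some]
        rw [List.foldl_cons, foldl_max_cons zs x z, ← ihy]
        rcases le_or_gt x y with hle | hlt
        · simp [max_eq_right hle, not_lt.mpr hle]
        · simp [max_eq_left hlt.le, hlt]
    | succ k =>
      have hk : k < xs.length := by simpa using h
      have tail_eq : sufMaxes (x :: xs) = (sufMaxes (x :: xs)).headD 0 :: sufMaxes xs := by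
        simp only [sufMaxes]
        cases hx : sufMaxes xs with
        | nil =>
          have hl := sufMaxes_length xs
          rw [hx] at hl
          have hxs : xs = [] := List.length_eq_zero_iff.mp hl.symm
          simp
        | cons y ys => simp
      rw [tail_eq]
      simp only [List.getD, List.getElem?_cons_succ, List.drop_succ_cons]
      exact ih k d hk

-- the two loop bodies agree on every in-range index, for every state
lemma step_eq (arr : List Int) (n : Int) (hpre : n ≤ (arr.length : Int))
    (st : Int × Int) (i : Int) (hi : i ∈ PySem.List.pyRange 0 n 1) :
    stepA arr n st i = stepB arr (sufMaxes arr) n st i := by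
  rw [PySem.List.mem_pyRange_one] at hi
  obtain ⟨hi0, hin⟩ := hi
  have hmr : (if i < n - 1 then
        (PySem.List.max? (PySem.List.slice arr (some (i + 1)) none) (fun y => y)).getD 0
      else -1)
      = (if i < n - 1 then PySem.List.pyGetD (sufMaxes arr) (i + 1) (-1) else -1) := by
    by_cases hlt : i < n - 1
    · simp only [hlt, if_pos]
      have h1 : (0 : Int) ≤ i + 1 := by omega
      have hjlt : (i + 1).toNat < arr.length := by omega
      rw [PySem.List.slice_from arr h1, PySem.List.pyGetD_of_nonneg (sufMaxes arr) (-1) h1]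
      rw [← sufMaxes_getD arr (i + 1).toNat (-1) hjlt]
      rfl
    · simp [hlt]
  simp only [stepA, stepB]
  rw [hmr]
  set x := PySem.List.pyGetD arr i 0 with hx
  by_cases hge : x ≥ st.2
  · simp only [hge, if_pos, true_and]
    have hrun : (if x > st.2 then x else st.2) = x := by
      rcases eq_or_lt_of_le hge with he | hlt
      · simp [← he]
      · simp [hlt]
    rw [hrun]
  · simp only [hge, false_and, if_false]
    have hngt : ¬ x > st.2 := by omega
    simp [hngt]

-- ===== VERDICT (by name: the statement is the Claim_ definition above) =====
theorem count_pivots_spec : Claim_equal_count_pivots := by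
  intro arr n _ hpre
  unfold Spec_count_pivots count_pivots count_pivots_alt
  exact congrArg Prod.fst
    (PySem.List.foldl_congr_mem _ _ _ _ (fun st i hi => step_eq arr n hpre st i hi))
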